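-- pv_equiv track=rewrite | github.com/nokaut/wsknn | wsknn/preprocessing/utils/files.py | _get_possible_dates_lower_bound_only
-- ===== SOURCE A (Python) =====
-- def _get_possible_dates_lower_bound_only(lower_date, fileslist):
--     sorted_files = sorted(fileslist)
--     flist = []
--     check = 0
--     for fname in sorted_files:
--         if check == 0:
--             if lower_date in fname:
--                 flist.append(fname)
--                 check = 1
--         else:
--             flist.append(fname)
--
--     return flist
-- ===== SOURCE B (Python) =====
-- def _get_possible_dates_lower_bound_only(lower_date, fileslist):
--     sorted_files = sorted(fileslist)
--     idx = next((i for i, f in enumerate(sorted_files) if lower_date in f), None)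
--     return [] if idx is None else sorted_files[idx:]
-- ===== Notes on version B (the rewrite author's own statement) =====
-- stated objective: simpler
-- what changed: Replaces A's flag-controlled element-by-element append loop with locating the index of the first filename containing lower_date and returning a single slice of the sorted list from there.
import Mathlib
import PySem

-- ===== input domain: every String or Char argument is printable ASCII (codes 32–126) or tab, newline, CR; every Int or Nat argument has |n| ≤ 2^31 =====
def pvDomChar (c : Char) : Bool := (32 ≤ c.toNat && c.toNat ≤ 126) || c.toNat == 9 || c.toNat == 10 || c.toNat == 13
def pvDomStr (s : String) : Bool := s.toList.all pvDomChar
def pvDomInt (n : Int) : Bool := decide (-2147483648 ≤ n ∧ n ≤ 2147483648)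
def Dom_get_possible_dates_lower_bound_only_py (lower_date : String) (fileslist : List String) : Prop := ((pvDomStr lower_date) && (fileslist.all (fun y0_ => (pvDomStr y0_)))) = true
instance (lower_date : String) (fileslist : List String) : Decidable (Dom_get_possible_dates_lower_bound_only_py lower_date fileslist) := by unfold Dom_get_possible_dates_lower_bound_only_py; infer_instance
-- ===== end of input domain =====

-- B replaces A's flag-controlled append loop by locating the first match index and slicing (objective: simpler).

-- ===== PORT A =====
def get_possible_dates_lower_bound_only_py (lower_date : String) (fileslist : List String) : List String :=
  let sorted_files := PySem.List.sorted fileslist (fun x => x) false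
  let st := sorted_files.foldl
    (fun (st : List String × Int) fname =>
      if st.2 == 0 then
        if PySem.Str.isIn lower_date fname then (st.1 ++ [fname], 1) else st
      else (st.1 ++ [fname], st.2))
    ([], 0)
  st.1

-- ===== PORT B =====
def get_possible_dates_lower_bound_only_py_alt (lower_date : String) (fileslist : List String) : List String :=
  let sorted_files := PySem.List.sorted fileslist (fun x => x) false
  match sorted_files.findIdx? (fun f => PySem.Str.isIn lower_date f) with
  | none => []
  | some i => sorted_files.drop i  -- sorted_files[i:] with 0 ≤ i ≤ len: exact

-- ===== PRECONDITION & SPEC =====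
def Spec_get_possible_dates_lower_bound_only_py (lower_date : String) (fileslist : List String) (out : List String) : Prop := out = get_possible_dates_lower_bound_only_py_alt lower_date fileslist
instance (lower_date : String) (fileslist : List String) (out : List String) : Decidable (Spec_get_possible_dates_lower_bound_only_py lower_date fileslist out) := by unfold Spec_get_possible_dates_lower_bound_only_py; infer_instance

-- ===== CLAIM (what is proved, stated in full; the proofs are below) =====
def Claim_equal_get_possible_dates_lower_bound_only_py : Prop := ∀ (lower_date : String) (fileslist : List String), Dom_get_possible_dates_lower_bound_only_py lower_date fileslist → Spec_get_possible_dates_lower_bound_only_py lower_date fileslist (get_possible_dates_lower_bound_only_py lower_date fileslist)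

-- ===== LEMMAS AND PROOFS =====

-- After the flag is set (check = 1), A's loop appends every remaining element.
theorem pv_loop_one (p : String → Bool) (l : List String) (acc : List String) :
    l.foldl
      (fun (st : List String × Int) fname =>
        if st.2 == 0 then
          if p fname then (st.1 ++ [fname], 1) else st
        else (st.1 ++ [fname], st.2))
      (acc, 1) = (acc ++ l, 1) := by
  induction l generalizing acc with
  | nil => simp
  | cons x xs ih => simpa [List.foldl] using ih (acc ++ [x])

-- With the flag unset, A's loop produces acc ++ (suffix from the first match).
theorem pv_loop_zero (p : String → Bool) (l : List String) (acc : List String) :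
    (l.foldl
      (fun (st : List String × Int) fname =>
        if st.2 == 0 then
          if p fname then (st.1 ++ [fname], 1) else st
        else (st.1 ++ [fname], st.2))
      (acc, 0)).1 =
    acc ++ (match l.findIdx? p with
            | none => []
            | some i => l.drop i) := by
  induction l generalizing acc with
  | nil => simp
  | cons x xs ih =>
    by_cases h : p x = true
    · simpa [List.foldl, h, List.findIdx?_cons] using congrArg Prod.fst (pv_loop_one p xs (acc ++ [x]))
    · cases hf : xs.findIdx? p with
      | none => simpa [List.foldl, h, List.findIdx?_cons, hf] using ih acc
      | some i => simpa [List.foldl, h, List.findIdx?_cons, hf] using ih acc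

-- ===== VERDICT (by name: the statement is the Claim_ definition above) =====
theorem get_possible_dates_lower_bound_only_py_spec : Claim_equal_get_possible_dates_lower_bound_only_py := by
  intro lower_date fileslist _
  unfold Spec_get_possible_dates_lower_bound_only_py
  unfold get_possible_dates_lower_bound_only_py get_possible_dates_lower_bound_only_py_alt
  simpa using pv_loop_zero (fun f => PySem.Str.isIn lower_date f)
    (PySem.List.sorted fileslist (fun x => x) false) []
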